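-- pv_equiv track=rewrite | github.com/dmitry-mingazov/mgl-data-analysis | filters.py | has_chain_multiple_cids
-- ===== SOURCE A (Python) =====
-- def has_chain_multiple_cids(chain):
--     if not len(chain):
--         return False
--     first_cid = chain[0]["cid"]
--     for row in chain:
--         if first_cid != row["cid"]:
--             return True
--     return False
-- ===== SOURCE B (Python) =====
-- def has_chain_multiple_cids(chain):
--     return len({row["cid"] for row in chain}) > 1
-- ===== Notes on version B (the rewrite author's own statement) =====
-- stated objective: simpler
-- what changed: Replaces the length guard, first-element capture and early-exit compare-to-first loop with a one-line set comprehension collecting all distinct cids and testing whether more than one exists.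
-- outside the precondition, e.g. on has_chain_multiple_cids([{'cid': 1}, {'cid': 2}, {'x': 0}]): A returns True, B raises KeyError
import Mathlib
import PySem

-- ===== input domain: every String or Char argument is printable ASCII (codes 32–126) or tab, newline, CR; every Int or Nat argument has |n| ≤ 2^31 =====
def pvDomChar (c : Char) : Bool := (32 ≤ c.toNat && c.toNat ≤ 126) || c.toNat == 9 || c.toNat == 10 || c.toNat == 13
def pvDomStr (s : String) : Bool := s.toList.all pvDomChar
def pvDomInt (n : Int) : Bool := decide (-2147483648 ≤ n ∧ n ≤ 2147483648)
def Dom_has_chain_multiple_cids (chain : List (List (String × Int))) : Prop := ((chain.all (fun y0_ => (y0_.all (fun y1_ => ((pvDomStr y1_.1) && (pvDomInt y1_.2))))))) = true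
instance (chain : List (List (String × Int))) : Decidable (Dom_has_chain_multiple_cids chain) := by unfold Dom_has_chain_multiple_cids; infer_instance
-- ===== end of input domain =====

-- B replaces A's early-exit compare-to-first loop by a set comprehension over all cids; objective: simpler.

-- ===== PORT A =====
-- row["cid"] (exact under Pre_, which guarantees the key is present)
def pvGetCid (row : List (String × Int)) : Int :=
  PySem.Dict.getD (PySem.Dict.mk row) "cid" 0

def pvLoopA (fc : Int) : List (List (String × Int)) → Bool
  | [] => false
  | row :: rest => if fc != pvGetCid row then true else pvLoopA fc rest

def has_chain_multiple_cids (chain : List (List (String × Int))) : Bool :=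
  match chain with
  | [] => false
  | first :: _ => pvLoopA (pvGetCid first) chain

-- ===== PORT B =====
def has_chain_multiple_cids_alt (chain : List (List (String × Int))) : Bool :=
  decide (1 < PySem.Set.len (PySem.Set.ofList (chain.map pvGetCid)))

-- ===== PRECONDITION & SPEC =====
-- Pre_ excludes chains containing a row without key "cid": there A either raises KeyError or, when its early-exit loop hits a differing cid first, returns True, while B's set comprehension always visits every row and raises KeyError.
def Pre_has_chain_multiple_cids (chain : List (List (String × Int))) : Prop :=
  ∀ row ∈ chain, (PySem.Dict.contains (PySem.Dict.mk row) "cid") = true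
instance (chain : List (List (String × Int))) : Decidable (Pre_has_chain_multiple_cids chain) := by
  unfold Pre_has_chain_multiple_cids; infer_instance

def pvWitness_has_chain_multiple_cids : (List (List (String × Int))) :=
  [[("cid", 1)], [("cid", 2)]]

def Spec_has_chain_multiple_cids (chain : List (List (String × Int))) (out : Bool) : Prop := out = has_chain_multiple_cids_alt chain
instance (chain : List (List (String × Int))) (out : Bool) : Decidable (Spec_has_chain_multiple_cids chain out) := by unfold Spec_has_chain_multiple_cids; infer_instance

-- ===== CLAIM (what is proved, stated in full; the proofs are below) =====
def Claim_equal_has_chain_multiple_cids : Prop := ∀ (chain : List (List (String × Int))), Dom_has_chain_multiple_cids chain → Pre_has_chain_multiple_cids chain → Spec_has_chain_multiple_cids chain (has_chain_multiple_cids chain)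

-- ===== LEMMAS AND PROOFS =====

theorem pvLoopA_eq_any (fc : Int) (l : List (List (String × Int))) :
    pvLoopA fc l = l.any (fun row => fc != pvGetCid row) := by
  induction l with
  | nil => rfl
  | cons r rest ih =>
      simp only [pvLoopA, List.any_cons]
      by_cases h : fc != pvGetCid r <;> simp [h, ih]

theorem pvOfList_const (a : Int) (ys : List Int) (h : ∀ y ∈ ys, y = a) :
    PySem.Set.ofList (a :: ys) = [a] := by
  induction ys with
  | nil => simp [PySem.Set.ofList_eq_foldl, List.foldl, PySem.Set.add, PySem.Set.contains]
  | cons y rest ih =>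
      have hy : y = a := h y (by simp)
      subst hy
      have h1 : PySem.Set.ofList (y :: y :: rest) = PySem.Set.ofList (y :: rest) := by
        simp [PySem.Set.ofList_eq_foldl, List.foldl, PySem.Set.add, PySem.Set.contains]
      rw [h1]
      exact ih (fun z hz => h z (by simp [hz]))

theorem pvTwo_mem_len {s : List Int} {a b : Int} (ha : a ∈ s) (hb : b ∈ s) (hne : a ≠ b) :
    1 < s.length := by
  have hsub : ({a, b} : Finset Int) ⊆ s.toFinset := by
    intro x hx
    simp only [Finset.mem_insert, Finset.mem_singleton] at hx
    rcases hx with rfl | rfl <;> simp [ha, hb]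
  have hcard : ({a, b} : Finset Int).card = 2 := Finset.card_pair hne
  have := Finset.card_le_card hsub
  have hle := s.toFinset_card_le
  omega

-- ===== VERDICT (by name: the statement is the Claim_ definition above) =====
theorem has_chain_multiple_cids_spec : Claim_equal_has_chain_multiple_cids := by
  intro chain _ _
  unfold Spec_has_chain_multiple_cids
  cases chain with
  | nil => rfl
  | cons first rest =>
      set fc := pvGetCid first with hfc
      have hA : has_chain_multiple_cids (first :: rest)
          = rest.any (fun row => fc != pvGetCid row) := by
        simp [has_chain_multiple_cids, pvLoopA, pvLoopA_eq_any, hfc]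
      rw [hA]
      unfold has_chain_multiple_cids_alt
      by_cases h : ∀ row ∈ rest, pvGetCid row = fc
      · have hany : rest.any (fun row => fc != pvGetCid row) = false := by
          simp only [List.any_eq_false]
          intro r hr
          simp [h r hr]
        have hset : PySem.Set.ofList ((first :: rest).map pvGetCid) = [fc] := by
          simp only [List.map_cons, ← hfc]
          exact pvOfList_const fc (rest.map pvGetCid) (by
            intro y hy
            obtain ⟨r, hr, rfl⟩ := List.mem_map.mp hy
            exact h r hr)
        rw [hset, hany]
        simp [PySem.Set.len]
      · push Not at h
        obtain ⟨r, hr, hne⟩ := h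
        have hany : rest.any (fun row => fc != pvGetCid row) = true := by
          simp only [List.any_eq_true]
          exact ⟨r, hr, by simp [bne_iff_ne]; exact fun e => hne e.symm⟩
        have hmem1 : fc ∈ PySem.Set.ofList ((first :: rest).map pvGetCid) := by
          rw [PySem.Set.mem_ofList]; simp [hfc]
        have hmem2 : pvGetCid r ∈ PySem.Set.ofList ((first :: rest).map pvGetCid) := by
          rw [PySem.Set.mem_ofList]; simp; right; exact ⟨r, hr, rfl⟩
        have hlen : 1 < (PySem.Set.ofList ((first :: rest).map pvGetCid)).length :=
          pvTwo_mem_len hmem1 hmem2 (fun e => hne e.symm)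
        simp only [List.map_cons] at hlen
        rw [hany]
        simp [PySem.Set.len, hlen]
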